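-- pv_equiv track=rewrite | github.com/shonkojoseph/Classwork | Dice Rolls.py | solution
-- ===== SOURCE A (Python) =====
-- def solution(A, F, M):
--     total_rolls = len(A) + F
--
--     total_sum_needed = M * total_rolls
--
--     current_sum = sum(A)
--
--     forgotten_sum_needed = total_sum_needed - current_sum
--
--     if forgotten_sum_needed < F or forgotten_sum_needed > 6 * F:
--         return [0]
--
--     result = [1] * F
--
--     forgotten_sum_needed -= F
--
--
--     for i in range(F):
--         add_value = min(5, forgotten_sum_needed)
--         result[i] += add_value
--         forgotten_sum_needed -= add_value
--
--     return result
-- ===== SOURCE B (Python) =====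
-- def solution(A, F, M):
--     forgotten_sum_needed = M * (len(A) + F) - sum(A)
--     if forgotten_sum_needed < F or forgotten_sum_needed > 6 * F:
--         return [0]
--     q, r = divmod(forgotten_sum_needed - F, 5)
--     if q < F:
--         return [6] * q + [1 + r] + [1] * (F - q - 1)
--     return [6] * F
-- ===== Notes on version B (the rewrite author's own statement) =====
-- stated objective: simpler
-- what changed: B replaces A's per-die greedy loop (min(5, remaining) subtracted F times) with a single divmod of the excess by 5 and a direct [6]*q + [1+r] + [1]*... list construction.
import Mathlib
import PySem

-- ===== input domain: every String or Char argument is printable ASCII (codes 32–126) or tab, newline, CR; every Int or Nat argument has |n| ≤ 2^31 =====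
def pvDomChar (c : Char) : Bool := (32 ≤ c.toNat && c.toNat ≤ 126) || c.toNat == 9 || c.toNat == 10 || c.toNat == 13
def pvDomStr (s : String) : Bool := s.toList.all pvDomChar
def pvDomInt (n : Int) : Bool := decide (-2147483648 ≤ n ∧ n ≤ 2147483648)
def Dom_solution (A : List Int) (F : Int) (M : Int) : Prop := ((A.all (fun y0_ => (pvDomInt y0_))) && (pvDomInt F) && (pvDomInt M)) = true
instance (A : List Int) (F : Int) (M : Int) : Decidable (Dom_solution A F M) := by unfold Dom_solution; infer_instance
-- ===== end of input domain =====

-- B replaces A's per-die greedy subtraction loop with one divmod and a direct list construction (objective: simpler).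

-- ===== PORT A =====
-- '[1] * F' with negative F is the empty list in Python; 'List.replicate F.toNat 1' matches that exactly.
-- In the loop, i ∈ range(F) so 0 ≤ i < F ≤ result length: 'i.toNat' indexing with set/getD is exact there.
def solution (A : List Int) (F : Int) (M : Int) : List Int :=
  let total_rolls : Int := (A.length : Int) + F
  let total_sum_needed := M * total_rolls
  let current_sum := A.sum
  let forgotten_sum_needed := total_sum_needed - current_sum
  if forgotten_sum_needed < F ∨ 6 * F < forgotten_sum_needed then [0]
  else
    let result : List Int := List.replicate F.toNat 1
    let forgotten_sum_needed := forgotten_sum_needed - F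
    let st := (PySem.List.pyRange 0 F 1).foldl
      (fun (st : List Int × Int) (i : Int) =>
        let add_value := min 5 st.2
        (st.1.set i.toNat (st.1.getD i.toNat 0 + add_value), st.2 - add_value))
      (result, forgotten_sum_needed)
    st.1

-- ===== PORT B =====
def solution_alt (A : List Int) (F : Int) (M : Int) : List Int :=
  let forgotten_sum_needed := M * ((A.length : Int) + F) - A.sum
  if forgotten_sum_needed < F ∨ 6 * F < forgotten_sum_needed then [0]
  else
    let q := PySem.Int.floordiv (forgotten_sum_needed - F) 5
    let r := PySem.Int.mod (forgotten_sum_needed - F) 5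
    if q < F then
      List.replicate q.toNat 6 ++ [1 + r] ++ List.replicate (F - q - 1).toNat 1
    else
      List.replicate F.toNat 6

-- ===== PRECONDITION & SPEC =====
def Spec_solution (A : List Int) (F : Int) (M : Int) (out : List Int) : Prop := out = solution_alt A F M
instance (A : List Int) (F : Int) (M : Int) (out : List Int) : Decidable (Spec_solution A F M out) := by unfold Spec_solution; infer_instance

-- ===== CLAIM (what is proved, stated in full; the proofs are below) =====
def Claim_equal_solution : Prop := ∀ (A : List Int) (F : Int) (M : Int), Dom_solution A F M → Spec_solution A F M (solution A F M)

-- ===== LEMMAS AND PROOFS =====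

-- A's loop step, with the integer index already reduced to its Nat value.
def pvStep (st : List Int × Int) (j : Nat) : List Int × Int :=
  let add_value := min 5 st.2
  (st.1.set j (st.1.getD j 0 + add_value), st.2 - add_value)

-- What the loop adds on the yet-untouched suffix of ones.
def pvBump : Nat → Int → List Int
  | 0, _ => []
  | n + 1, rem => (1 + min 5 rem) :: pvBump n (rem - min 5 rem)

theorem pvBump_zero (n : Nat) : pvBump n 0 = List.replicate n 1 := by
  induction n with
  | zero => rfl
  | succ n ih => simp [pvBump, ih, List.replicate_succ]

theorem pvFold_int (l : List Nat) (init : List Int × Int) :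
    (l.map (fun k : Nat => ((0 : Int) + (k : Int)))).foldl
      (fun (st : List Int × Int) (i : Int) =>
        (st.1.set i.toNat (st.1.getD i.toNat 0 + min 5 st.2), st.2 - min 5 st.2)) init
    = l.foldl pvStep init := by
  rw [List.foldl_map]
  apply List.foldl_ext
  intro st k _
  simp [pvStep]

theorem pvLoop_spec (n : Nat) : ∀ (k : Nat) (p : List Int) (rem : Int), p.length = k →
    ((List.range' k n).foldl pvStep (p ++ List.replicate n 1, rem)).1 = p ++ pvBump n rem := by
  induction n with
  | zero => intro k p rem _; simp [pvBump]
  | succ n ih =>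
    intro k p rem hk
    rw [List.range'_succ, List.replicate_succ, List.foldl_cons]
    have hget : (p ++ 1 :: List.replicate n 1).getD k 0 = 1 := by
      simp [List.getD, ← hk]
    have hset : ∀ v : Int, (p ++ 1 :: List.replicate n 1).set k v
        = (p ++ [v]) ++ List.replicate n 1 := by
      intro v
      rw [List.set_append]
      simp [← hk]
    show ((List.range' (k+1) n).foldl pvStep (pvStep (p ++ 1 :: List.replicate n 1, rem) k)).1 = _
    rw [pvStep, hget, hset]
    have := ih (k+1) (p ++ [1 + min 5 rem]) (rem - min 5 rem) (by simp [hk])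
    simp only [this, pvBump]
    simp

theorem pvBump_closed (n : Nat) : ∀ (q r : Int), 0 ≤ r → r < 5 → 0 ≤ q → 5 * q + r ≤ 5 * n →
    pvBump n (5 * q + r) =
      if q < (n : Int) then
        List.replicate q.toNat 6 ++ (1 + r) :: List.replicate ((n : Int) - q - 1).toNat 1
      else List.replicate n 6 := by
  induction n with
  | zero =>
    intro q r hr hr5 hq hle
    have hq0 : q = 0 := by omega
    simp [pvBump, hq0]
  | succ n ih =>
    intro q r hr hr5 hq hle
    rcases eq_or_lt_of_le hq with hq0 | hq1
    · -- q = 0 : the first die takes the whole remainder r < 5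
      have hq0' : q = 0 := hq0.symm
      subst hq0'
      simp only [pvBump]
      have h5 : (5 : Int) * 0 + r = r := by ring
      rw [h5, min_eq_right (by omega : r ≤ 5), sub_self, pvBump_zero,
        if_pos (by push_cast; omega : (0 : Int) < ((n + 1 : Nat) : Int))]
      have hlen : (((n + 1 : Nat) : Int) - 0 - 1).toNat = n := by push_cast; omega
      rw [hlen]
      simp
    · -- q ≥ 1 : the first die is maxed to 6
      have hmin : min 5 (5 * q + r) = 5 := by omega
      simp only [pvBump]
      rw [hmin]
      have harg : 5 * q + r - 5 = 5 * (q - 1) + r := by ring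
      rw [harg, ih (q - 1) r hr hr5 (by omega) (by omega)]
      by_cases hlt : q - 1 < (n : Int)
      · rw [if_pos hlt, if_pos (by push_cast; omega)]
        have hrep : (6 : Int) :: List.replicate (q - 1).toNat 6 = List.replicate q.toNat 6 := by
          have hqn : q.toNat = (q - 1).toNat + 1 := by omega
          rw [hqn, List.replicate_succ]
        have hlen : ((n : Int) - (q - 1) - 1).toNat = (((n + 1 : Nat) : Int) - q - 1).toNat := by
          push_cast; omega
        rw [← hrep, ← hlen]
        norm_num
      · rw [if_neg hlt, if_neg (by push_cast at hlt ⊢; omega)]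
        rw [List.replicate_succ]
        norm_num

theorem pvMain (A : List Int) (F : Int) (M : Int) : solution A F M = solution_alt A F M := by
  unfold solution solution_alt
  set s := M * ((A.length : Int) + F) - A.sum with hs
  by_cases hg : s < F ∨ 6 * F < s
  · rw [if_pos hg, if_pos hg]
  · rw [if_neg hg, if_neg hg]
    push Not at hg
    obtain ⟨h1, h2⟩ := hg
    have hF0 : 0 ≤ F := by omega
    set n := F.toNat with hn
    have hFn : F = (n : Int) := by omega
    set rem := s - F with hrem
    have hrem0 : 0 ≤ rem := by omega
    have hrem5 : rem ≤ 5 * n := by omega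
    -- left side: reduce the pyRange fold to pvBump
    have hfold : ((PySem.List.pyRange 0 F 1).foldl
        (fun (st : List Int × Int) (i : Int) =>
          (st.1.set i.toNat (st.1.getD i.toNat 0 + min 5 st.2), st.2 - min 5 st.2))
        (List.replicate n 1, rem)).1 = pvBump n rem := by
      rw [PySem.List.pyRange_one]
      have h0 : (F - 0).toNat = n := by omega
      rw [h0, pvFold_int, List.range_eq_range']
      have := pvLoop_spec n 0 [] rem (by simp)
      simpa using this
    rw [hfold]
    -- right side: identify floordiv/mod with a quotient-remainder pair
    set q := PySem.Int.floordiv rem 5 with hq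
    set r := PySem.Int.mod rem 5 with hr
    have hqe : q = rem / 5 := by rw [hq, PySem.Int.floordiv_eq_ediv_of_pos (by norm_num)]
    have hre : r = rem % 5 := by rw [hr, PySem.Int.mod_eq_emod_of_pos (by norm_num)]
    have hdecomp : rem = 5 * q + r := by rw [hqe, hre]; omega
    have hr0 : 0 ≤ r := by rw [hre]; omega
    have hr5 : r < 5 := by rw [hre]; omega
    have hq0 : 0 ≤ q := by rw [hqe]; omega
    have hqle : 5 * q + r ≤ 5 * n := by omega
    rw [hdecomp, pvBump_closed n q r hr0 hr5 hq0 hqle, hFn]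
    by_cases hlt : q < (n : Int)
    · rw [if_pos hlt, if_pos hlt]
      simp
    · rw [if_neg hlt, if_neg hlt]

-- ===== VERDICT (by name: the statement is the Claim_ definition above) =====
theorem solution_spec : Claim_equal_solution := by
  intro A F M _
  unfold Spec_solution
  exact pvMain A F M
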